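-- pv_equiv track=rewrite | github.com/LukeGibson/SquashVision | Project/src/Project/v7_calculations.py | calcContactFrames
-- ===== SOURCE A (Python) =====
-- def calcContactFrames(anglePoints, deltaPoints):
--     contactFrames = []
--
--     minAngle = 180
--     minAngleIndex = -1
--
--     for i in range(len(anglePoints)):
--         angle = anglePoints[i]
--
--         if angle != None:
--             if angle < minAngle:
--                 minAngle = angle
--                 minAngleIndex = i
--
--     if minAngleIndex > 0 and minAngleIndex < len(anglePoints):
--         contactFrames = [minAngleIndex - 1, minAngleIndex, minAngleIndex + 1]
--     else:
--         contactFrames = [minAngleIndex]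
--
--     return contactFrames
-- ===== SOURCE B (Python) =====
-- def calcContactFrames(anglePoints, deltaPoints):
--     valid = [a for a in anglePoints if a is not None and a < 180]
--     minAngleIndex = anglePoints.index(min(valid)) if valid else -1
--     if 0 < minAngleIndex < len(anglePoints):
--         return [minAngleIndex - 1, minAngleIndex, minAngleIndex + 1]
--     return [minAngleIndex]
-- ===== Notes on version B (the rewrite author's own statement) =====
-- stated objective: idiomatic
-- what changed: Replaces the manual running-min/-index tracking loop by filter-the-valid-angles + built-in min + list.index for the first occurrence.
import Mathlib
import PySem

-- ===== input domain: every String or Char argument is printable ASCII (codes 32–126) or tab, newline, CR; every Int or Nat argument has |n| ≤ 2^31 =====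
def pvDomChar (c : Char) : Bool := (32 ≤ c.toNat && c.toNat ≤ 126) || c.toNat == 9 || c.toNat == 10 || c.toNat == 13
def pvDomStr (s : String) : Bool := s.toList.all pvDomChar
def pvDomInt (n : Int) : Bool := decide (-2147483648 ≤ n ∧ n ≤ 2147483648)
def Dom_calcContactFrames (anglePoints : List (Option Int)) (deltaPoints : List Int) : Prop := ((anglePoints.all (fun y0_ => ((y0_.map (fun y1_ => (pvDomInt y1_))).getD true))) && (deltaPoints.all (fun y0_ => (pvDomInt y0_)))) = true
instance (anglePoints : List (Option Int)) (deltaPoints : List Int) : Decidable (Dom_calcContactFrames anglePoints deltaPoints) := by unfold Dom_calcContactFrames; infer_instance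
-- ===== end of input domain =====

-- B replaces A's manual running-min/-index tracking loop by filter + built-in min + first-occurrence index (idiomatic; same O(n) cost).

-- ===== PORT A =====
-- the body of A's 'for i in range(len(anglePoints))' loop, over the running (minAngle, minAngleIndex)
def pvStepA (s : Int × Int) (p : Int × Option Int) : Int × Int :=
  match p.2 with
  | none => s
  | some a => if a < s.1 then (a, p.1) else s

def calcContactFrames (anglePoints : List (Option Int)) (deltaPoints : List Int) : List Int :=
  let s := (PySem.List.enumerate anglePoints 0).foldl pvStepA (180, -1)
  let minAngleIndex := s.2
  if minAngleIndex > 0 ∧ minAngleIndex < PySem.List.len anglePoints then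
    [minAngleIndex - 1, minAngleIndex, minAngleIndex + 1]
  else
    [minAngleIndex]

-- ===== PORT B =====
def calcContactFrames_alt (anglePoints : List (Option Int)) (deltaPoints : List Int) : List Int :=
  -- valid = [a for a in anglePoints if a is not None and a < 180]
  let valid : List Int := anglePoints.filterMap (fun o =>
    match o with
    | none => none
    | some a => if a < 180 then some a else none)
  -- minAngleIndex = anglePoints.index(min(valid)) if valid else -1
  let minAngleIndex : Int :=
    match PySem.List.min? valid (fun y => y) with
    | some m =>
        match PySem.List.index? anglePoints (some m) with
        | some k => (k : Int)   -- list.index; the minimum is always a member, so this branch is the one taken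
        | none => -1
    | none => -1
  if 0 < minAngleIndex ∧ minAngleIndex < PySem.List.len anglePoints then
    [minAngleIndex - 1, minAngleIndex, minAngleIndex + 1]
  else
    [minAngleIndex]

-- ===== PRECONDITION & SPEC =====
def Spec_calcContactFrames (anglePoints : List (Option Int)) (deltaPoints : List Int) (out : List Int) : Prop := out = calcContactFrames_alt anglePoints deltaPoints
instance (anglePoints : List (Option Int)) (deltaPoints : List Int) (out : List Int) : Decidable (Spec_calcContactFrames anglePoints deltaPoints out) := by unfold Spec_calcContactFrames; infer_instance

-- ===== CLAIM (what is proved, stated in full; the proofs are below) =====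
def Claim_equal_calcContactFrames : Prop := ∀ (anglePoints : List (Option Int)) (deltaPoints : List Int), Dom_calcContactFrames anglePoints deltaPoints → Spec_calcContactFrames anglePoints deltaPoints (calcContactFrames anglePoints deltaPoints)

-- ===== LEMMAS AND PROOFS =====

-- the non-None values of the input list, in order
def pvVals : List (Option Int) → List Int
  | [] => []
  | none :: t => pvVals t
  | some a :: t => a :: pvVals t

lemma mem_pvVals {a : Int} {l : List (Option Int)} : a ∈ pvVals l ↔ some a ∈ l := by
  induction l with
  | nil => simp [pvVals]
  | cons o t ih => cases o <;> simp [pvVals, ih]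

lemma foldl_min_min (a b : Int) (l : List Int) :
    l.foldl min (min a b) = min a (l.foldl min b) := by
  induction l generalizing a b with
  | nil => simp
  | cons c t ih =>
    simp only [List.foldl_cons]
    rw [min_assoc, ih]

-- min? of a nonempty Int list as min of head and tail's min?
lemma min?_id_char (a : Int) (t : List Int) :
    (PySem.List.min? (a :: t) (fun y => y)) = some (match PySem.List.min? t (fun y => y) with
      | none => a
      | some w => min a w) := by
  rw [PySem.List.min?_id_cons]
  cases t with
  | nil => simp [PySem.List.min?]
  | cons b r =>
    rw [PySem.List.min?_id_cons]
    simp only [List.foldl_cons]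
    rw [foldl_min_min]

-- characterisation of A's loop: final state in terms of the minimum value and its first index
lemma loopA_char (l : List (Option Int)) (k m j : Int) :
    List.foldl pvStepA (m, j) (PySem.List.enumerate l k) =
      (match PySem.List.min? (pvVals l) (fun y => y) with
      | none => (m, j)
      | some v =>
          if v < m then (v, k + (((PySem.List.index? l (some v)).getD 0 : Nat) : Int))
          else (m, j)) := by
  induction l generalizing k m j with
  | nil => simp [PySem.List.enumerate_nil, pvVals, PySem.List.min?]
  | cons o t ih =>
    rw [PySem.List.enumerate_cons]
    simp only [List.foldl_cons]
    cases o with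
    | none =>
      have hstep : pvStepA (m, j) (k, none) = (m, j) := rfl
      rw [hstep, ih]
      show _ = (match PySem.List.min? (pvVals t) (fun y => y) with
        | none => (m, j)
        | some v => if v < m then (v, k + (((PySem.List.index? (none :: t) (some v)).getD 0 : Nat) : Int)) else (m, j))
      cases hv : PySem.List.min? (pvVals t) (fun y => y) with
      | none => rfl
      | some v =>
        have hvt : (some v) ∈ t := mem_pvVals.mp (PySem.List.min?_mem hv)
        rcases Option.isSome_iff_exists.mp ((PySem.List.index?_isSome_iff t (some v)).mpr hvt) with ⟨n, hn⟩
        dsimp only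
        rw [PySem.List.index?_cons_of_ne _ (by simp), hn]
        simp only [Option.map_some, Option.getD_some]
        split <;> [skip; rfl]
        congr 1
        push_cast; ring
    | some a =>
      have hstep : pvStepA (m, j) (k, some a) = if a < m then (a, k) else (m, j) := rfl
      rw [hstep]
      show _ = (match PySem.List.min? (a :: pvVals t) (fun y => y) with
        | none => (m, j)
        | some v => if v < m then (v, k + (((PySem.List.index? ((some a) :: t) (some v)).getD 0 : Nat) : Int)) else (m, j))
      rw [min?_id_char]
      cases hv : PySem.List.min? (pvVals t) (fun y => y) with
      | none =>
        -- t has no values: the loop over t leaves the state unchanged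
        by_cases ham : a < m
        · rw [if_pos ham, ih, hv]
          dsimp only
          rw [if_pos ham, PySem.List.index?_cons_self]
          simp
        · rw [if_neg ham, ih, hv]
          dsimp only
          rw [if_neg ham]
      | some w =>
        have hwt : (some w) ∈ t := mem_pvVals.mp (PySem.List.min?_mem hv)
        rcases Option.isSome_iff_exists.mp ((PySem.List.index?_isSome_iff t (some w)).mpr hwt) with ⟨n, hn⟩
        by_cases ham : a < m
        · rw [if_pos ham, ih, hv]
          dsimp only
          by_cases hwa : w < a
          · have hwm : w < m := lt_trans hwa ham
            have hmin : min a w = w := min_eq_right (le_of_lt hwa)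
            rw [if_pos hwa, hn, hmin, if_pos hwm,
                PySem.List.index?_cons_of_ne _ (by simp [ne_of_gt hwa]), hn]
            simp only [Option.map_some, Option.getD_some]
            congr 1
            push_cast; ring
          · have hmin : min a w = a := min_eq_left (le_of_not_gt hwa)
            rw [if_neg hwa, hmin, if_pos ham, PySem.List.index?_cons_self]
            simp
        · rw [if_neg ham, ih, hv]
          dsimp only
          have ham' : m ≤ a := le_of_not_gt ham
          by_cases hwm : w < m
          · have hwa : w < a := lt_of_lt_of_le hwm ham'
            have hmin : min a w = w := min_eq_right (le_of_lt hwa)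
            rw [if_pos hwm, hn, hmin, if_pos hwm,
                PySem.List.index?_cons_of_ne _ (by simp [ne_of_gt hwa]), hn]
            simp only [Option.map_some, Option.getD_some]
            congr 1
            push_cast; ring
          · rw [if_neg hwm]
            have hmm : ¬ min a w < m := by
              rcases min_cases a w with ⟨h1, _⟩ | ⟨h1, _⟩ <;> rw [h1] <;> omega
            rw [if_neg hmm]

-- B's list comprehension = filter (< 180) of the values
lemma valid_eq_filter (l : List (Option Int)) :
    l.filterMap (fun o => match o with
      | none => none
      | some a => if a < 180 then some a else none)
      = (pvVals l).filter (fun a => decide (a < 180)) := by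
  induction l with
  | nil => rfl
  | cons o t ih =>
    cases o with
    | none => simpa [pvVals] using ih
    | some a =>
      by_cases h : a < (180:Int) <;> simp [pvVals, h, ih]

theorem calcContactFrames_spec : Claim_equal_calcContactFrames := by
  intro ap dp _
  unfold Spec_calcContactFrames calcContactFrames calcContactFrames_alt
  simp only [loopA_char, valid_eq_filter]
  cases hv : PySem.List.min? (pvVals ap) (fun y => y) with
  | none =>
    -- no angle values at all: the filtered list is empty too
    have hVnil : pvVals ap = [] := (PySem.List.min?_eq_none_iff _ _).mp hv
    have hFnil : (pvVals ap).filter (fun a => decide (a < 180)) = [] := by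
      rw [hVnil]; rfl
    rw [hFnil]
    norm_num [PySem.List.min?, PySem.List.len]
  | some v =>
    have hvV : v ∈ pvVals ap := PySem.List.min?_mem hv
    have hmin : ∀ y ∈ pvVals ap, v ≤ y := fun y hy => PySem.List.min?_isMin hv y hy
    dsimp only
    by_cases hlt : v < (180:Int)
    · simp only [if_pos hlt]
      -- v survives the filter and is still the minimum there
      have hvF : v ∈ (pvVals ap).filter (fun a => decide (a < 180)) :=
        List.mem_filter.mpr ⟨hvV, by simpa using hlt⟩
      cases hw : PySem.List.min? ((pvVals ap).filter (fun a => decide (a < 180))) (fun y => y) with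
      | none =>
        have := (PySem.List.min?_eq_none_iff _ _).mp hw
        rw [this] at hvF
        simp at hvF
      | some w =>
        have hwv : w = v := by
          have hwF := PySem.List.min?_mem hw
          have hwV : w ∈ pvVals ap := (List.mem_filter.mp hwF).1
          have h1 : v ≤ w := hmin w hwV
          have h2 : w ≤ v := PySem.List.min?_isMin hw v hvF
          omega
        subst hwv
        have hvap : (some w) ∈ ap := mem_pvVals.mp hvV
        rcases Option.isSome_iff_exists.mp ((PySem.List.index?_isSome_iff ap (some w)).mpr hvap) with ⟨n, hn⟩
        rw [hn]
        dsimp only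
        simp only [hn, Option.getD_some, zero_add, gt_iff_lt]
    · simp only [if_neg hlt]
      -- every value is ≥ v ≥ 180: the filtered list is empty
      have hFnil : (pvVals ap).filter (fun a => decide (a < 180)) = [] := by
        rw [List.filter_eq_nil_iff]
        intro y hy
        have := hmin y hy
        simp only [decide_eq_true_eq]
        omega
      rw [hFnil]
      norm_num [PySem.List.min?, PySem.List.len]
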